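-- pv_equiv track=rewrite | github.com/thermopower/template | scripts/convert_agents_opencode.py | map_tools
-- ===== SOURCE A (Python) =====
-- TOOL_MAP = {
--     "Read": "read",
--     "Write": "write",
--     "Edit": "edit",
--     "Glob": "glob",
--     "Grep": "grep",
--     "Bash": "bash",
--     "Agent": "task",
--     "WebSearch": "webfetch",
-- }
--
-- def map_tools(tools_str: str) -> dict[str, bool]:
--     """Map Claude tools to OpenCode tool permissions."""
--     result = {
--         "read": False,
--         "glob": False,
--         "grep": False,
--         "bash": False,
--         "write": False,
--         "edit": False,
--         "task": False,
--         "webfetch": False,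
--     }
--     for t in tools_str.split(","):
--         t = t.strip()
--         if t.startswith("mcp__"):
--             continue  # Skip MCP tools (handled separately)
--         oc_tool = TOOL_MAP.get(t)
--         if oc_tool:
--             result[oc_tool] = True
--     return result
-- ===== SOURCE B (Python) =====
-- TOOL_MAP = {
--     "Read": "read",
--     "Write": "write",
--     "Edit": "edit",
--     "Glob": "glob",
--     "Grep": "grep",
--     "Bash": "bash",
--     "Agent": "task",
--     "WebSearch": "webfetch",
-- }
--
-- # Reverse map: OpenCode flag -> the Claude tool name that enables it,
-- # listed in A's output order.
-- INV = {
--     "read": "Read",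
--     "glob": "Glob",
--     "grep": "Grep",
--     "bash": "Bash",
--     "write": "Write",
--     "edit": "Edit",
--     "task": "Agent",
--     "webfetch": "WebSearch",
-- }
--
-- def map_tools(tools_str: str) -> dict[str, bool]:
--     """Map Claude tools to OpenCode tool permissions."""
--     # Build the set of stripped tokens once (no per-token mapping; mcp__* tokens
--     # are harmless here since they never equal a Claude tool name).
--     tokens = {t.strip() for t in tools_str.split(",")}
--     # Query direction is reversed: for each output flag, ask whether ITS Claude
--     # tool name was listed.
--     return {flag: name in tokens for flag, name in INV.items()}
-- ===== Notes on version B (the rewrite author's own statement) =====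
-- stated objective: simpler
-- what changed: A scans tokens, maps each through TOOL_MAP and mutates a pre-initialized dict; B inverts the lookup direction: it builds the raw set of stripped tokens once and then, for each of the eight fixed output flags, tests whether that flag's Claude tool name is a member of the token set - no per-token mapping, no mcp__ branch, no dict mutation.
import Mathlib
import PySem

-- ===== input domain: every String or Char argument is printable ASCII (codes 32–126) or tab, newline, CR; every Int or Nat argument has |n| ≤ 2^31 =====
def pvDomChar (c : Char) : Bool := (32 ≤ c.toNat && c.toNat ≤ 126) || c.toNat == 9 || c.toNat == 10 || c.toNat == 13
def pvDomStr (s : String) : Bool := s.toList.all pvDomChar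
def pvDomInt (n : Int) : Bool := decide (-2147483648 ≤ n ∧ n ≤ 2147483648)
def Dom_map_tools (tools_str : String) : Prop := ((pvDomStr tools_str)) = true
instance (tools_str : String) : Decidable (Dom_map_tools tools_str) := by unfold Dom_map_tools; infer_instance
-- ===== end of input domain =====

-- B replaces A's token-scan-and-mutate dict loop by a reversed lookup: a set of
-- stripped tokens and, per fixed output flag, a membership test of its Claude name
-- (objective: simpler; return value only).


-- ===== PORT A =====
-- module-level constant TOOL_MAP (A's Claude name -> OpenCode flag dict)
def toolMap : PySem.Dict String String := PySem.Dict.ofList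
  [("Read", "read"), ("Write", "write"), ("Edit", "edit"), ("Glob", "glob"),
   ("Grep", "grep"), ("Bash", "bash"), ("Agent", "task"), ("WebSearch", "webfetch")]

def map_tools (tools_str : String) : List (String × Bool) :=
  let result : PySem.Dict String Bool := PySem.Dict.ofList
    [("read", false), ("glob", false), ("grep", false), ("bash", false),
     ("write", false), ("edit", false), ("task", false), ("webfetch", false)]
  -- split(",") with a nonempty literal separator never raises: split? is some, getD is exact
  let final := ((PySem.Str.split? tools_str ",").getD []).foldl (fun d t =>
    let t := PySem.Str.strip t
    if PySem.Str.startswith t "mcp__" then d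
    else
      match toolMap.get? t with
      | some oc => if oc = "" then d else d.insert oc true  -- 'if oc_tool:' truthiness on str/None
      | none => d) result
  final.items

-- ===== PORT B =====
-- module-level constant INV (B's flag -> Claude name dict, in A's output order)
def invMap : List (String × String) :=
  [("read", "Read"), ("glob", "Glob"), ("grep", "Grep"), ("bash", "Bash"),
   ("write", "Write"), ("edit", "Edit"), ("task", "Agent"), ("webfetch", "WebSearch")]

def map_tools_alt (tools_str : String) : List (String × Bool) :=
  let tokens : PySem.Set String :=
    PySem.Set.ofList (((PySem.Str.split? tools_str ",").getD []).map PySem.Str.strip)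
  invMap.map (fun p => (p.1, PySem.Set.contains tokens p.2))

-- ===== PRECONDITION & SPEC =====
def Spec_map_tools (tools_str : String) (out : List (String × Bool)) : Prop := out = map_tools_alt tools_str
instance (tools_str : String) (out : List (String × Bool)) : Decidable (Spec_map_tools tools_str out) := by unfold Spec_map_tools; infer_instance

-- ===== CLAIM (what is proved, stated in full; the proofs are below) =====
def Claim_equal_map_tools : Prop := ∀ (tools_str : String), Dom_map_tools tools_str → Spec_map_tools tools_str (map_tools tools_str)

-- ===== LEMMAS AND PROOFS =====

-- A's dict, expressed through the list of stripped tokens seen so far: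
-- each flag holds true iff its Claude name occurs among them.
def dictOf (seen : List String) : PySem.Dict String Bool :=
  PySem.Dict.mk (invMap.map (fun p => (p.1, seen.contains p.2)))

lemma insert_dictOf (seen : List String) (f n : String) (h : (f, n) ∈ invMap) :
    (dictOf seen).insert f true = dictOf (seen ++ [n]) := by
  fin_cases h <;> simp [dictOf, invMap, PySem.Dict.insert]

lemma skip_dictOf (seen : List String) (t : String)
    (h : ∀ p ∈ invMap, t ≠ p.2) :
    dictOf seen = dictOf (seen ++ [t]) := by
  simp only [dictOf]
  congr 1
  refine List.map_congr_left (fun p hp => ?_)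
  have := h p hp
  simp [Ne.symm this]

lemma loop_eq (ts : List String) (seen : List String) :
    ts.foldl (fun d t =>
      let t := PySem.Str.strip t
      if PySem.Str.startswith t "mcp__" then d
      else
        match toolMap.get? t with
        | some oc => if oc = "" then d else d.insert oc true
        | none => d) (dictOf seen)
    = dictOf (seen ++ ts.map PySem.Str.strip) := by
  induction ts generalizing seen with
  | nil => simp
  | cons t ts ih =>
    simp only [List.foldl_cons, List.map_cons]
    have step : (if PySem.Str.startswith (PySem.Str.strip t) "mcp__" = true then dictOf seen
        else
          match toolMap.get? (PySem.Str.strip t) with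
          | some oc => if oc = "" then dictOf seen else (dictOf seen).insert oc true
          | none => dictOf seen) = dictOf (seen ++ [PySem.Str.strip t]) := by
      by_cases h1 : PySem.Str.strip t = "Read"
      · simp only [h1]; rw [show toolMap.get? "Read" = some "read" from by decide]
        simpa using insert_dictOf seen "read" "Read" (by decide)
      · by_cases h2 : PySem.Str.strip t = "Write"
        · simp only [h2]; rw [show toolMap.get? "Write" = some "write" from by decide]
          simpa using insert_dictOf seen "write" "Write" (by decide)
        · by_cases h3 : PySem.Str.strip t = "Edit"
          · simp only [h3]; rw [show toolMap.get? "Edit" = some "edit" from by decide]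
            simpa using insert_dictOf seen "edit" "Edit" (by decide)
          · by_cases h4 : PySem.Str.strip t = "Glob"
            · simp only [h4]; rw [show toolMap.get? "Glob" = some "glob" from by decide]
              simpa using insert_dictOf seen "glob" "Glob" (by decide)
            · by_cases h5 : PySem.Str.strip t = "Grep"
              · simp only [h5]; rw [show toolMap.get? "Grep" = some "grep" from by decide]
                simpa using insert_dictOf seen "grep" "Grep" (by decide)
              · by_cases h6 : PySem.Str.strip t = "Bash"
                · simp only [h6]; rw [show toolMap.get? "Bash" = some "bash" from by decide]
                  simpa using insert_dictOf seen "bash" "Bash" (by decide)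
                · by_cases h7 : PySem.Str.strip t = "Agent"
                  · simp only [h7]; rw [show toolMap.get? "Agent" = some "task" from by decide]
                    simpa using insert_dictOf seen "task" "Agent" (by decide)
                  · by_cases h8 : PySem.Str.strip t = "WebSearch"
                    · simp only [h8]; rw [show toolMap.get? "WebSearch" = some "webfetch" from by decide]
                      simpa using insert_dictOf seen "webfetch" "WebSearch" (by decide)
                    · have hinv : ∀ p ∈ invMap, PySem.Str.strip t ≠ p.2 := by
                        intro p hp
                        fin_cases hp <;> simpa using ‹_›
                      have hskip := skip_dictOf seen (PySem.Str.strip t) hinv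
                      have hg : toolMap.get? (PySem.Str.strip t) = none := by
                        rw [show toolMap = PySem.Dict.mk
                          [("Read", "read"), ("Write", "write"), ("Edit", "edit"), ("Glob", "glob"),
                           ("Grep", "grep"), ("Bash", "bash"), ("Agent", "task"), ("WebSearch", "webfetch")]
                          from by decide]
                        simp [PySem.Dict.get?, beq_iff_eq, Ne.symm h1, Ne.symm h2, Ne.symm h3,
                          Ne.symm h4, Ne.symm h5, Ne.symm h6, Ne.symm h7, Ne.symm h8]
                      simp only [hg]
                      by_cases hm : PySem.Str.startswith (PySem.Str.strip t) "mcp__" = true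
                      · simp only [hm, if_true]; exact hskip
                      · simp only [Bool.not_eq_true] at hm
                        simp only [hm, Bool.false_eq_true, if_false]; exact hskip
    rw [step, ih]
    simp

-- ===== VERDICT (by name: the statement is the Claim_ definition above) =====
theorem map_tools_spec : Claim_equal_map_tools := by
  intro tools_str _
  unfold Spec_map_tools
  simp only [map_tools, map_tools_alt]
  rw [show (PySem.Dict.ofList
      [("read", false), ("glob", false), ("grep", false), ("bash", false),
       ("write", false), ("edit", false), ("task", false), ("webfetch", false)]
      : PySem.Dict String Bool) = dictOf [] from by decide]
  rw [loop_eq]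
  simp [dictOf]
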